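-- pv_equiv track=rewrite | github.com/pypi-data/pypi-mirror-247 | packages/fixa/fixa-0.14.1.tar.gz/fixa-0.14.1/fixa/aws/aws_s3_uri.py | smart_join_s3_key
-- ===== SOURCE A (Python) =====
-- import typing as T
--
-- def split_parts(key: str) -> T.List[str]:
--     """
--     Split s3 key parts using "/" delimiter.
--
--     Example::
--
--         >>> split_parts("a/b/c")
--         ["a", "b", "c"]
--         >>> split_parts("//a//b//c//")
--         ["a", "b", "c"]
--     """
--     return [part for part in key.split("/") if part]
--
-- def smart_join_s3_key(
--     parts: T.List[str],
--     is_dir: bool,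
-- ) -> str:
--     """
--     Note, it assume that there's no such double slack in your path. It ensure
--     that there's only one consecutive "/" in the s3 key.
--
--     :param parts: list of s3 key path parts, could have "/"
--     :param is_dir: if True, the s3 key ends with "/". otherwise enforce no
--         tailing "/".
--
--     Example::
--
--         >>> smart_join_s3_key(parts=["/a/", "b/", "/c"], is_dir=True)
--         a/b/c/
--         >>> smart_join_s3_key(parts=["/a/", "b/", "/c"], is_dir=False)
--         a/b/c
--     """
--     new_parts = list()
--     for part in parts:
--         new_parts.extend(split_parts(part))
--     key = "/".join(new_parts)
--     if is_dir:
--         return key + "/"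
--     else:
--         return key
-- ===== SOURCE B (Python) =====
-- def smart_join_s3_key(parts, is_dir):
--     # single character-level pass: collapse slash runs and drop leading slashes
--     # by seeding prev with "/", then trim the single possible trailing slash
--     out = []
--     prev = "/"
--     for ch in "/".join(parts):
--         if ch != "/" or prev != "/":
--             out.append(ch)
--         prev = ch
--     key = "".join(out)
--     if key.endswith("/"):
--         key = key[:-1]
--     if is_dir:
--         return key + "/"
--     else:
--         return key
-- ===== Notes on version B (the rewrite author's own statement) =====
-- stated objective: alternative
-- what changed: A tokenizes each part separately (split on '/', filter empties, extend a list) and rejoins; B makes one character-level pass over '/'.join(parts) that drops any '/' following a '/' (prev seeded with '/', so leading slashes vanish) and then trims the single possible trailing slash.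
import Mathlib
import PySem

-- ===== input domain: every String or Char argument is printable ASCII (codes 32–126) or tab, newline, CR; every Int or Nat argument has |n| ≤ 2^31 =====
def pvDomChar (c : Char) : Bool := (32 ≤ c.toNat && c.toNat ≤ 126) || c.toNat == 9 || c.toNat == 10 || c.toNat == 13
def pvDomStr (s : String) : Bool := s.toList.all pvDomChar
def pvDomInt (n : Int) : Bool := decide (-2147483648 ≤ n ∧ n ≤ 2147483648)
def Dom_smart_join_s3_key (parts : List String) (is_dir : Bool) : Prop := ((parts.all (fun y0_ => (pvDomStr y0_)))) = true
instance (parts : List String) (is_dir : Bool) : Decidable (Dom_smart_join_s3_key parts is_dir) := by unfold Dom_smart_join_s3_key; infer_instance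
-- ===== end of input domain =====

-- B replaces A's per-part split/filter/extend tokenization by one character-level pass over
-- "/".join(parts) that collapses slash runs and strips the boundary slashes (objective: alternative).


-- ===== PORT A =====
-- key.split("/") : the separator "/" is non-empty, so Python never raises (split? is `some` here)
def split_parts (key : String) : List String :=
  ((PySem.Str.split? key "/").getD []).filter (fun part => part ≠ "")

def smart_join_s3_key (parts : List String) (is_dir : Bool) : String :=
  let new_parts := parts.foldl (fun acc part => acc ++ split_parts part) []
  let key := PySem.Str.join "/" new_parts
  if is_dir then key ++ "/" else key

-- ===== PORT B =====
def smart_join_s3_key_alt (parts : List String) (is_dir : Bool) : String :=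
  -- for ch in "/".join(parts): keep ch unless it is a '/' following a '/'; prev seeded with '/'
  let st := (PySem.Str.join "/" parts).toList.foldl
    (fun (s : List Char × Char) ch => (if ch ≠ '/' ∨ s.2 ≠ '/' then s.1 ++ [ch] else s.1, ch))
    ([], '/')
  let key0 := String.ofList st.1
  let key := if PySem.Str.endswith key0 "/" then PySem.Str.slice key0 none (some (-1)) else key0
  if is_dir then key ++ "/" else key

-- ===== PRECONDITION & SPEC =====
def Spec_smart_join_s3_key (parts : List String) (is_dir : Bool) (out : String) : Prop := out = smart_join_s3_key_alt parts is_dir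
instance (parts : List String) (is_dir : Bool) (out : String) : Decidable (Spec_smart_join_s3_key parts is_dir out) := by unfold Spec_smart_join_s3_key; infer_instance

-- ===== CLAIM (what is proved, stated in full; the proofs are below) =====
def Claim_equal_smart_join_s3_key : Prop := ∀ (parts : List String) (is_dir : Bool), Dom_smart_join_s3_key parts is_dir → Spec_smart_join_s3_key parts is_dir (smart_join_s3_key parts is_dir)

-- ===== LEMMAS AND PROOFS =====

/-- Python's `key.split("/")` with the piece currently being accumulated made explicit. -/
def mySplit : List Char → List Char → List (List Char)
  | pre, [] => [pre]
  | pre, c :: r => if c = '/' then pre :: mySplit [] r else mySplit (pre ++ [c]) r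

/-- B's loop body as a function of the previous character. -/
def colP : Char → List Char → List Char
  | _, [] => []
  | prev, c :: r => if c = '/' ∧ prev = '/' then colP prev r else c :: colP c r

/-- The non-empty s3 key tokens of a character list. -/
def Tk (l : List Char) : List (List Char) := (mySplit [] l).filter (fun t => t ≠ [])

lemma go_slash (n : Nat) (r cur : List Char) (acc : List (List Char)) :
    PySem.Chars.splitOn.go ['/'] (n+1) ('/' :: r) cur acc = PySem.Chars.splitOn.go ['/'] n r [] (cur.reverse :: acc) := by
  rw [PySem.Chars.splitOn.go]
  simp [List.isPrefixOf]

lemma go_other (n : Nat) (c : Char) (r cur : List Char) (acc : List (List Char)) (hc : c ≠ '/') :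
    PySem.Chars.splitOn.go ['/'] (n+1) (c :: r) cur acc = PySem.Chars.splitOn.go ['/'] n r (c :: cur) acc := by
  rw [PySem.Chars.splitOn.go]
  simp [List.isPrefixOf, Ne.symm hc]

lemma go_eq : ∀ (fuel : Nat) (l cur : List Char) (acc : List (List Char)), l.length ≤ fuel →
    PySem.Chars.splitOn.go ['/'] fuel l cur acc = acc.reverse ++ mySplit cur.reverse l := by
  intro fuel
  induction fuel with
  | zero =>
    intro l cur acc h
    have hl : l = [] := by cases l <;> simp_all
    subst hl
    rw [PySem.Chars.splitOn.go]
    simp [mySplit]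
  | succ n ih =>
    intro l cur acc h
    cases l with
    | nil =>
      rw [PySem.Chars.splitOn.go]
      · simp [mySplit]
      · omega
    | cons c r =>
      by_cases hc : c = '/'
      · subst hc
        rw [go_slash, ih r [] (cur.reverse :: acc) (by simpa using Nat.le_of_succ_le_succ h)]
        simp [mySplit]
      · rw [go_other n c r cur acc hc, ih r (c :: cur) acc (by simpa using Nat.le_of_succ_le_succ h)]
        simp [mySplit, hc]

lemma splitOn_eq (l : List Char) : PySem.Chars.splitOn l ['/'] = mySplit [] l := by
  unfold PySem.Chars.splitOn
  rw [go_eq (l.length + 1) l [] [] (by omega)]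
  simp

lemma mySplit_append : ∀ (a pre b : List Char), mySplit pre (a ++ '/' :: b) = mySplit pre a ++ mySplit [] b := by
  intro a
  induction a with
  | nil => intro pre b; simp [mySplit]
  | cons c a ih =>
    intro pre b
    by_cases hc : c = '/' <;> simp [mySplit, hc, ih]

lemma Tk_append (a b : List Char) : Tk (a ++ '/' :: b) = Tk a ++ Tk b := by
  have h := mySplit_append a [] b
  simp [Tk, h, List.filter_append]

lemma mySplit_first : ∀ (l pre : List Char), ∃ s t, mySplit pre l = (pre ++ s) :: t := by
  intro l
  induction l with
  | nil => intro pre; exact ⟨[], [], by simp [mySplit]⟩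
  | cons c r ih =>
    intro pre
    by_cases hc : c = '/'
    · exact ⟨[], mySplit [] r, by simp [mySplit, hc]⟩
    · obtain ⟨s, t, hst⟩ := ih (pre ++ [c])
      exact ⟨c :: s, t, by simp [mySplit, hc, hst]⟩

lemma Tk_nil : Tk ([] : List Char) = [] := by simp [Tk, mySplit]

lemma Tk_ne_nil_ne {r : List Char} (hT : Tk r ≠ []) : r ≠ [] := by
  intro h; subst h; exact hT Tk_nil

lemma Tk_cons_ne (c : Char) (r : List Char) (hc : c ≠ '/') :
    Tk (c :: r) = (mySplit [c] r).filter (fun t => t ≠ []) ∧ Tk (c :: r) ≠ [] := by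
  have h1 : Tk (c :: r) = (mySplit [c] r).filter (fun t => t ≠ []) := by
    simp [Tk, mySplit, hc]
  refine ⟨h1, ?_⟩
  obtain ⟨s, t, hst⟩ := mySplit_first r [c]
  rw [h1, hst]
  simp

lemma Tk_nil_allslash : ∀ (r : List Char), Tk r = [] → ∀ x ∈ r, x = '/' := by
  intro r
  induction r with
  | nil => simp
  | cons c r ih =>
    intro h x hx
    by_cases hc : c = '/'
    · have hTk : Tk (c :: r) = Tk r := by simp [Tk, mySplit, hc]
      rcases List.mem_cons.mp hx with hx | hx
      · rw [hx]; exact hc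
      · exact ih (by rw [← hTk]; exact h) x hx
    · exact absurd h (Tk_cons_ne c r hc).2

lemma allslash_getLast {r : List Char} (hr : r ≠ []) (hT : Tk r = []) : r.getLast? = some '/' := by
  obtain ⟨x, hx⟩ := Option.isSome_iff_exists.mp (List.getLast?_isSome.mpr hr)
  rw [hx, Tk_nil_allslash r hT x (List.mem_of_getLast? hx)]

lemma getLast?_cons_ne_nil {α : Type} (a : α) {r : List α} (hr : r ≠ []) :
    (a :: r).getLast? = r.getLast? := by
  cases r with
  | nil => exact absurd rfl hr
  | cons b t => exact List.getLast?_cons_cons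

lemma noslash : ∀ (l pre t : List Char), '/' ∉ pre → t ∈ mySplit pre l → '/' ∉ t := by
  intro l
  induction l with
  | nil => intro pre t hp ht; simp [mySplit] at ht; subst ht; exact hp
  | cons c r ih =>
    intro pre t hp ht
    by_cases hc : c = '/'
    · simp [mySplit, hc] at ht
      rcases ht with ht | ht
      · subst ht; exact hp
      · exact ih [] t (by simp) ht
    · simp [mySplit, hc] at ht
      exact ih (pre ++ [c]) t (by simp [hp, Ne.symm hc]) ht

lemma Tk_members (l : List Char) : ∀ t ∈ Tk l, t ≠ [] ∧ '/' ∉ t := by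
  intro t ht
  have h1 := List.of_mem_filter ht
  have h2 := List.mem_of_mem_filter ht
  exact ⟨by simpa using h1, noslash l [] t (by simp) h2⟩

lemma inter_cons (x : List Char) {ts : List (List Char)} (h : ts ≠ []) :
    List.intercalate ['/'] (x :: ts) = x ++ '/' :: List.intercalate ['/'] ts := by
  cases ts with
  | nil => exact absurd rfl h
  | cons b t => simp [List.intercalate, List.intersperse]

lemma main_both : ∀ (n : Nat) (l : List Char), l.length ≤ n →
    (colP '/' l = List.intercalate ['/'] (Tk l) ++ (if Tk l ≠ [] ∧ l.getLast? = some '/' then ['/'] else []))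
  ∧ (∀ (pre : List Char) (c : Char), c ≠ '/' →
      List.intercalate ['/'] ((mySplit (pre ++ [c]) l).filter (fun t => t ≠ [])) ++ (if l.getLast? = some '/' then ['/'] else [])
        = (pre ++ [c]) ++ colP c l) := by
  intro n
  induction n with
  | zero =>
    intro l h
    have hl : l = [] := by cases l <;> simp_all
    subst hl
    constructor
    · simp [colP, Tk_nil, List.intercalate]
    · intro pre c _
      simp [mySplit, colP, List.intercalate]
  | succ n ih =>
    intro l h
    cases l with
    | nil =>
      constructor
      · simp [colP, Tk_nil, List.intercalate]
      · intro pre c _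
        simp [mySplit, colP, List.intercalate]
    | cons d r =>
      have hr : r.length ≤ n := by simpa using Nat.le_of_succ_le_succ h
      obtain ⟨ih1, ih2⟩ := ih r hr
      by_cases hd : d = '/'
      · subst hd
        have hcol : colP '/' ('/' :: r) = colP '/' r := by simp [colP]
        have hTk : Tk ('/' :: r) = Tk r := by simp [Tk, mySplit]
        constructor
        · rw [hcol, ih1, hTk]
          by_cases hT : Tk r = []
          · simp [hT]
          · rw [getLast?_cons_ne_nil '/' (Tk_ne_nil_ne hT)]
        · intro pre c hc
          have hms : mySplit (pre ++ [c]) ('/' :: r) = (pre ++ [c]) :: mySplit [] r := by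
            simp [mySplit]
          have hfil : ((pre ++ [c]) :: mySplit [] r).filter (fun t => t ≠ []) = (pre ++ [c]) :: Tk r := by
            simp [Tk]
          have hcolc : colP c ('/' :: r) = '/' :: colP '/' r := by
            simp [colP, hc]
          rw [hms, hfil, hcolc]
          by_cases hT : Tk r = []
          · have hlast : ('/' :: r).getLast? = some '/' := by
              cases hr0 : r with
              | nil => rfl
              | cons y t =>
                rw [getLast?_cons_ne_nil '/' (by simp)]
                exact allslash_getLast (by simp) (hr0 ▸ hT)
            have hcolr : colP '/' r = [] := by
              rw [ih1, hT]
              simp [List.intercalate]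
            rw [hlast, hT, hcolr]
            simp [List.intercalate]
          · have hlast : ('/' :: r).getLast? = r.getLast? :=
              getLast?_cons_ne_nil '/' (Tk_ne_nil_ne hT)
            rw [inter_cons _ hT, ih1, hlast]
            simp [hT]
      · -- d ≠ '/'
        have hcons := Tk_cons_ne d r hd
        have hne : (mySplit [d] r).filter (fun t => t ≠ []) ≠ [] := hcons.1 ▸ hcons.2
        constructor
        · have hmain := ih2 [] d hd
          simp only [List.nil_append] at hmain
          have hcol : colP '/' (d :: r) = d :: colP d r := by
            simp [colP, hd]
          have hifs : (if Tk (d :: r) ≠ [] ∧ (d :: r).getLast? = some '/' then (['/'] : List Char) else [])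
              = (if r.getLast? = some '/' then (['/'] : List Char) else []) := by
            rw [hcons.1]
            cases hr0 : r with
            | nil => simp [hd]
            | cons y t =>
              rw [getLast?_cons_ne_nil d (by simp)]
              by_cases hgl : (y :: t).getLast? = some '/'
              · obtain ⟨s, t', hst⟩ := mySplit_first (y :: t) [d]
                simp [hgl, hst]
              · simp [hgl]
          rw [hcol, hifs, hcons.1, hmain]
          simp
        · intro pre c hc
          have hms : mySplit (pre ++ [c]) (d :: r) = mySplit ((pre ++ [c]) ++ [d]) r := by
            simp [mySplit, hd]
          have hmain := ih2 (pre ++ [c]) d hd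
          have hcolc : colP c (d :: r) = d :: colP d r := by
            simp [colP, hd]
          rw [hms, hcolc]
          have hlast2 : (if (d :: r).getLast? = some '/' then (['/'] : List Char) else [])
              = (if r.getLast? = some '/' then (['/'] : List Char) else []) := by
            cases hr0 : r with
            | nil => simp [hd]
            | cons y t => rw [getLast?_cons_ne_nil d (by simp)]
          rw [hlast2, hmain]
          simp

lemma colP_slash (l : List Char) :
    colP '/' l = List.intercalate ['/'] (Tk l) ++ (if Tk l ≠ [] ∧ l.getLast? = some '/' then ['/'] else []) :=
  (main_both l.length l le_rfl).1

lemma foldl_colP : ∀ (l out : List Char) (prev : Char),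
    (List.foldl (fun (s : List Char × Char) ch => (if ch ≠ '/' ∨ s.2 ≠ '/' then s.1 ++ [ch] else s.1, ch)) (out, prev) l).1
      = out ++ colP prev l := by
  intro l
  induction l with
  | nil => intro out prev; simp [colP]
  | cons c r ih =>
    intro out prev
    by_cases h : c = '/' ∧ prev = '/'
    · obtain ⟨hc, hp⟩ := h
      simp only [List.foldl_cons, hc, hp, ne_eq, not_true_eq_false, or_self, if_false, colP,
        and_self, if_true]
      rw [ih]
    · have hcond : (c ≠ '/' ∨ prev ≠ '/') := by tauto
      simp only [List.foldl_cons, if_pos hcond, colP, if_neg h]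
      rw [ih]
      simp

lemma inter_tokens_last : ∀ (ts : List (List Char)), ts ≠ [] → (∀ t ∈ ts, t ≠ [] ∧ '/' ∉ t) →
    List.intercalate ['/'] ts ≠ [] ∧ (List.intercalate ['/'] ts).getLast? ≠ some '/' := by
  intro ts
  induction ts with
  | nil => simp
  | cons a ts ih =>
    intro _ hmem
    obtain ⟨ha, hs⟩ := hmem a (by simp)
    cases ts with
    | nil =>
      have h1 : List.intercalate ['/'] [a] = a := by simp [List.intercalate]
      rw [h1]
      exact ⟨ha, fun hlast => hs (List.mem_of_getLast? hlast)⟩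
    | cons b ts' =>
      have hih := ih (by simp) (fun t ht => hmem t (by simp [ht]))
      rw [inter_cons a (by simp)]
      refine ⟨by simp, ?_⟩
      rw [List.getLast?_append_of_ne_nil _ (by simp)]
      cases hbe : List.intercalate ['/'] (b :: ts') with
      | nil => exact absurd hbe hih.1
      | cons x xs =>
        rw [← hbe, show ('/' :: List.intercalate ['/'] (b :: ts')).getLast?
            = (List.intercalate ['/'] (b :: ts')).getLast? from by
          rw [hbe]; exact List.getLast?_cons_cons]
        exact hih.2

lemma Tk_join : ∀ (ls : List (List Char)), Tk (List.intercalate ['/'] ls) = ls.flatMap Tk := by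
  intro ls
  induction ls with
  | nil => simp [List.intercalate, Tk_nil]
  | cons a ts ih =>
    cases ts with
    | nil => simp [List.intercalate]
    | cons b ts' =>
      rw [inter_cons a (by simp), Tk_append, ih]
      simp

lemma split_parts_toList (p : String) : (split_parts p).map String.toList = Tk p.toList := by
  have hsep : ("/" : String).toList = ['/'] := rfl
  simp only [split_parts, PySem.Str.split?, hsep, PySem.Chars.split?, List.isEmpty_cons,
    Bool.false_eq_true, if_false, Option.map_some, Option.getD_some, splitOn_eq]
  rw [List.filter_map, List.map_map]
  rw [List.filter_congr (l := mySplit [] p.toList)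
      (q := fun t => t ≠ []) (fun t _ => by simp [Function.comp])]
  simp [Tk, Function.comp_def]

lemma keyB_toList (parts : List String) :
    (let st := (PySem.Str.join "/" parts).toList.foldl
        (fun (s : List Char × Char) ch => (if ch ≠ '/' ∨ s.2 ≠ '/' then s.1 ++ [ch] else s.1, ch)) ([], '/')
     let key0 := String.ofList st.1
     if PySem.Str.endswith key0 "/" then PySem.Str.slice key0 none (some (-1)) else key0).toList
      = List.intercalate ['/'] (Tk (PySem.Str.join "/" parts).toList) := by
  simp only []
  set L := (PySem.Str.join "/" parts).toList with hLdef
  have hst : (L.foldl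
      (fun (s : List Char × Char) ch => (if ch ≠ '/' ∨ s.2 ≠ '/' then s.1 ++ [ch] else s.1, ch)) ([], '/')).1
      = colP '/' L := by
    rw [foldl_colP]; simp
  rw [hst, colP_slash]
  have hsep : ("/" : String).toList = ['/'] := rfl
  by_cases hT : Tk L = []
  · simp only [hT, ne_eq, not_true_eq_false, false_and, if_false, List.append_nil]
    have h0 : List.intercalate ['/'] ([] : List (List Char)) = [] := by simp [List.intercalate]
    rw [h0]
    decide
  · by_cases hE : L.getLast? = some '/'
    · have hb : (if Tk L ≠ [] ∧ L.getLast? = some '/' then (['/'] : List Char) else []) = ['/'] := by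
        simp [hT, hE]
      rw [hb]
      have hend : PySem.Str.endswith (String.ofList (List.intercalate ['/'] (Tk L) ++ ['/'])) "/" = true := by
        rw [PySem.Str.endswith_eq]
        simp only [String.toList_ofList, hsep]
        exact (PySem.Chars.endswith_iff _ _).mpr ⟨List.intercalate ['/'] (Tk L), rfl⟩
      rw [hend]
      simp only [if_true]
      rw [PySem.Str.slice_to_neg_one]
      simp
    · have hb : (if Tk L ≠ [] ∧ L.getLast? = some '/' then (['/'] : List Char) else []) = [] := by
        simp [hE]
      rw [hb, List.append_nil]
      have hnot : ¬ (['/'] <:+ List.intercalate ['/'] (Tk L)) := by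
        rintro ⟨y, hy⟩
        exact (inter_tokens_last (Tk L) hT (Tk_members L)).2 (hy ▸ List.getLast?_concat)
      have hend : PySem.Str.endswith (String.ofList (List.intercalate ['/'] (Tk L))) "/" = false := by
        rw [PySem.Str.endswith_eq]
        simp only [String.toList_ofList, hsep]
        cases hb2 : PySem.Chars.endswith (List.intercalate ['/'] (Tk L)) ['/'] with
        | false => rfl
        | true => exact absurd ((PySem.Chars.endswith_iff _ _).mp hb2) hnot
      rw [hend]
      simp

lemma keyA_toList (parts : List String) :
    (PySem.Str.join "/" (parts.foldl (fun acc part => acc ++ split_parts part) [])).toList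
      = List.intercalate ['/'] (Tk (PySem.Str.join "/" parts).toList) := by
  have hsep : ("/" : String).toList = ['/'] := rfl
  have hTkL : Tk (PySem.Str.join "/" parts).toList = parts.flatMap (fun p => Tk p.toList) := by
    rw [PySem.Str.toList_join, PySem.Chars.join, hsep, Tk_join, List.flatMap_map]
  rw [hTkL, PySem.List.foldl_append_eq_flatMap, PySem.Str.toList_join, PySem.Chars.join, hsep]
  simp only [List.nil_append, List.map_flatMap]
  simp only [split_parts_toList]

-- ===== VERDICT (by name: the statement is the Claim_ definition above) =====
theorem smart_join_s3_key_spec : Claim_equal_smart_join_s3_key := by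
  intro parts is_dir _
  unfold Spec_smart_join_s3_key
  show smart_join_s3_key parts is_dir = smart_join_s3_key_alt parts is_dir
  have hkeys :
      PySem.Str.join "/" (parts.foldl (fun acc part => acc ++ split_parts part) [])
        = (let st := (PySem.Str.join "/" parts).toList.foldl
              (fun (s : List Char × Char) ch => (if ch ≠ '/' ∨ s.2 ≠ '/' then s.1 ++ [ch] else s.1, ch)) ([], '/')
           let key0 := String.ofList st.1
           if PySem.Str.endswith key0 "/" then PySem.Str.slice key0 none (some (-1)) else key0) :=
    String.toList_inj.mp ((keyA_toList parts).trans (keyB_toList parts).symm)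
  simp only [smart_join_s3_key, smart_join_s3_key_alt]
  rw [hkeys]
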